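-- pv_equiv track=rewrite | github.com/allenai/supp-ai-data | scripts/add_cui_info.py | process_synonyms
-- ===== SOURCE A (Python) =====
-- import unicodedata
--
-- def process_synonyms(all_names):
--     """
--     Get list of synonyms
--     :param all_names:
--     :return:
--     """
--     all_names.sort(key=lambda x: x[0])
--
--     done_set = set([])
--     syn = []
--     for order, name_type, name in all_names:
--         norm_name = unicodedata.normalize('NFC', name)
--         if norm_name and norm_name.lower() not in done_set:
--             if order <= 4 or (order > 4 and not syn):
--                 syn.append(norm_name)
--                 done_set.add(norm_name.lower())
--     return syn
-- ===== SOURCE B (Python) =====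
-- import unicodedata
--
-- def process_synonyms(all_names):
--     all_names.sort(key=lambda x: x[0])
--     seen = set()
--     syn = []
--     for order, _name_type, name in all_names:
--         if order <= 4:
--             norm = unicodedata.normalize('NFC', name)
--             if norm and norm.lower() not in seen:
--                 syn.append(norm)
--                 seen.add(norm.lower())
--     if not syn:
--         for order, _name_type, name in all_names:
--             if order > 4:
--                 norm = unicodedata.normalize('NFC', name)
--                 if norm:
--                     syn.append(norm)
--                     break
--     return syn
-- ===== Notes on version B (the rewrite author's own statement) =====
-- stated objective: alternative
-- what changed: A's single loop with a combined 'order <= 4 or syn empty' condition is split into a primary dedup pass over order <= 4 entries plus a separate fallback scan for the first non-empty order > 4 name, run only when the primary pass found nothing.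
import Mathlib
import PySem

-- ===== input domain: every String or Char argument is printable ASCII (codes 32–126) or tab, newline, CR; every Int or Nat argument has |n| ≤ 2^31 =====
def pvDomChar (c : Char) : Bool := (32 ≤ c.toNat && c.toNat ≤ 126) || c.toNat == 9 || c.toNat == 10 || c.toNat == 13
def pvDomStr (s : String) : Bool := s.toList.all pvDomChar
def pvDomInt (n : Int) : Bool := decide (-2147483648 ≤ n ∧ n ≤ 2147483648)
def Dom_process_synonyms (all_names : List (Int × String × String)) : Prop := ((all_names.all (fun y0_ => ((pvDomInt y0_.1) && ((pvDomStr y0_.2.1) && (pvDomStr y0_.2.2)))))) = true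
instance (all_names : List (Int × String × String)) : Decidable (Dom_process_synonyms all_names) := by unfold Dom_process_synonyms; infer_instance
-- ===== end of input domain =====

-- B splits A's single mixed loop into a primary pass over order ≤ 4 entries and a separate
-- fallback scan for the first order > 4 entry, run only when the primary pass yields nothing
-- (objective: simpler control flow; same cost). Both versions also sort all_names in place in
-- Python; the equivalence proved here is about the RETURN value only (the mutation is identical).

-- ===== PORT A =====
-- unicodedata.normalize('NFC', s) is the identity on the ASCII domain (exact there)
def pvNFC (s : String) : String := s

def pvStepA (st : PySem.Set String × List String) (x : Int × String × String) :
    PySem.Set String × List String :=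
  let norm := pvNFC x.2.2
  if norm ≠ "" ∧ st.1.contains (PySem.Str.lower norm) = false then
    if x.1 ≤ 4 ∨ (4 < x.1 ∧ st.2 = []) then
      (st.1.add (PySem.Str.lower norm), st.2 ++ [norm])
    else st
  else st

def process_synonyms (all_names : List (Int × String × String)) : List String :=
  ((PySem.List.sorted all_names (fun x => x.1)).foldl pvStepA (PySem.Set.empty, [])).2

-- ===== PORT B =====
def pvStepB (st : PySem.Set String × List String) (x : Int × String × String) :
    PySem.Set String × List String :=
  if x.1 ≤ 4 then
    let norm := pvNFC x.2.2
    if norm ≠ "" ∧ st.1.contains (PySem.Str.lower norm) = false then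
      (st.1.add (PySem.Str.lower norm), st.2 ++ [norm])
    else st
  else st

def pvFallback : List (Int × String × String) → List String
  | [] => []
  | x :: rest => if 4 < x.1 ∧ pvNFC x.2.2 ≠ "" then [pvNFC x.2.2] else pvFallback rest

def process_synonyms_alt (all_names : List (Int × String × String)) : List String :=
  let s := PySem.List.sorted all_names (fun x => x.1)
  let syn := (s.foldl pvStepB (PySem.Set.empty, [])).2
  if syn = [] then pvFallback s else syn

-- ===== PRECONDITION & SPEC =====
def Spec_process_synonyms (all_names : List (Int × String × String)) (out : List String) : Prop := out = process_synonyms_alt all_names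
instance (all_names : List (Int × String × String)) (out : List String) : Decidable (Spec_process_synonyms all_names out) := by unfold Spec_process_synonyms; infer_instance

-- ===== CLAIM (what is proved, stated in full; the proofs are below) =====
def Claim_equal_process_synonyms : Prop := ∀ (all_names : List (Int × String × String)), Dom_process_synonyms all_names → Spec_process_synonyms all_names (process_synonyms all_names)

-- ===== LEMMAS AND PROOFS =====

-- A's fallback branch with an arbitrary starting dedup set (used only with generalized `done`)
def pvFallbackD (done : PySem.Set String) : List (Int × String × String) → List String
  | [] => []
  | x :: rest =>
    if 4 < x.1 ∧ pvNFC x.2.2 ≠ "" ∧ done.contains (PySem.Str.lower (pvNFC x.2.2)) = false then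
      [pvNFC x.2.2]
    else pvFallbackD done rest

theorem pvFallbackD_empty (l : List (Int × String × String)) :
    pvFallbackD PySem.Set.empty l = pvFallback l := by
  induction l with
  | nil => rfl
  | cons x t ih =>
    simp only [pvFallbackD, pvFallback]
    split_ifs <;> simp_all

theorem pvStepB_snd_ne (st : PySem.Set String × List String) (x : Int × String × String)
    (h : st.2 ≠ []) : (pvStepB st x).2 ≠ [] := by
  simp only [pvStepB]
  split_ifs <;> simp [h]

theorem pvFoldB_snd_ne (t : List (Int × String × String)) (st : PySem.Set String × List String)
    (h : st.2 ≠ []) : (t.foldl pvStepB st).2 ≠ [] := by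
  induction t generalizing st with
  | nil => exact h
  | cons x r ih => exact ih _ (pvStepB_snd_ne st x h)

theorem pvStepA_eq_pvStepB (st : PySem.Set String × List String) (x : Int × String × String)
    (h : st.2 ≠ []) : pvStepA st x = pvStepB st x := by
  unfold pvStepA pvStepB
  by_cases h4 : x.1 ≤ 4 <;> split_ifs <;> simp_all <;> omega

theorem pvFoldA_eq_pvFoldB (t : List (Int × String × String)) (st : PySem.Set String × List String)
    (h : st.2 ≠ []) : t.foldl pvStepA st = t.foldl pvStepB st := by
  induction t generalizing st with
  | nil => rfl
  | cons x r ih =>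
    simp only [List.foldl_cons, pvStepA_eq_pvStepB st x h]
    exact ih _ (pvStepB_snd_ne st x h)

theorem pvFoldB_skip_gt4 (t : List (Int × String × String)) (st : PySem.Set String × List String)
    (h : ∀ x ∈ t, 4 < x.1) : t.foldl pvStepB st = st := by
  induction t with
  | nil => rfl
  | cons x r ih =>
    have hx : ¬ x.1 ≤ 4 := by have := h x (by simp); omega
    simp only [List.foldl_cons, pvStepB, if_neg hx]
    exact ih (fun y hy => h y (by simp [hy]))

theorem pvMain (l : List (Int × String × String))
    (hp : l.Pairwise (fun a b => a.1 ≤ b.1)) (done : PySem.Set String) :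
    (l.foldl pvStepA (done, [])).2 =
      (if (l.foldl pvStepB (done, [])).2 = [] then pvFallbackD done l
       else (l.foldl pvStepB (done, [])).2) := by
  induction l generalizing done with
  | nil => rfl
  | cons x t ih =>
    rcases List.pairwise_cons.mp hp with ⟨hx, ht⟩
    by_cases h4 : x.1 ≤ 4
    · -- x handled identically by both primary passes
      by_cases hc : pvNFC x.2.2 ≠ "" ∧ (done.contains (PySem.Str.lower (pvNFC x.2.2))) = false
      · -- append: both states become nonempty
        have hc2 : PySem.Str.lower (pvNFC x.2.2) ∉ done := by simpa using hc.2
        have hA : pvStepA (done, []) x =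
            (done.add (PySem.Str.lower (pvNFC x.2.2)), [pvNFC x.2.2]) := by
          simp [pvStepA, hc.1, hc2, h4]
        have hB : pvStepB (done, []) x =
            (done.add (PySem.Str.lower (pvNFC x.2.2)), [pvNFC x.2.2]) := by
          simp [pvStepB, hc.1, hc2, h4]
        have hne : ((done.add (PySem.Str.lower (pvNFC x.2.2)), [pvNFC x.2.2]) :
            PySem.Set String × List String).2 ≠ [] := by simp
        have hBne := pvFoldB_snd_ne t _ hne
        simp only [List.foldl_cons, hA, hB, pvFoldA_eq_pvFoldB t _ hne, if_neg hBne]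
      · -- skip on both sides
        have hA : pvStepA (done, []) x = (done, []) := by
          simp only [pvStepA]; rw [if_neg hc]
        have hB : pvStepB (done, []) x = (done, []) := by
          simp only [pvStepB, if_pos h4]; rw [if_neg hc]
        have hfb : pvFallbackD done (x :: t) = pvFallbackD done t := by
          simp only [pvFallbackD]; rw [if_neg (by omega)]
        simp only [List.foldl_cons, hA, hB, hfb]
        exact ih ht done
    · -- x.1 > 4: everything in t is > 4 as well
      have hgt : ∀ y ∈ t, 4 < y.1 := fun y hy => by have := hx y hy; omega
      have hB : pvStepB (done, []) x = (done, []) := by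
        simp only [pvStepB]; rw [if_neg h4]
      have hBt := pvFoldB_skip_gt4 t ((done, []) : PySem.Set String × List String) hgt
      by_cases hc : pvNFC x.2.2 ≠ "" ∧ (done.contains (PySem.Str.lower (pvNFC x.2.2))) = false
      · -- A appends x (fallback fires), then skips the rest
        have hc2 : PySem.Str.lower (pvNFC x.2.2) ∉ done := by simpa using hc.2
        have hA : pvStepA (done, []) x =
            (done.add (PySem.Str.lower (pvNFC x.2.2)), [pvNFC x.2.2]) := by
          simp [pvStepA, hc.1, hc2, h4]
        have hne : ((done.add (PySem.Str.lower (pvNFC x.2.2)), [pvNFC x.2.2]) :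
            PySem.Set String × List String).2 ≠ [] := by simp
        have hAt : t.foldl pvStepA (done.add (PySem.Str.lower (pvNFC x.2.2)), [pvNFC x.2.2]) =
            (done.add (PySem.Str.lower (pvNFC x.2.2)), [pvNFC x.2.2]) := by
          rw [pvFoldA_eq_pvFoldB t _ hne]
          exact pvFoldB_skip_gt4 t _ hgt
        have hfb : pvFallbackD done (x :: t) = [pvNFC x.2.2] := by
          simp only [pvFallbackD]
          rw [if_pos ⟨by omega, hc.1, hc.2⟩]
        simp only [List.foldl_cons, hA, hB, hAt, hBt, hfb]
        simp
      · -- A skips x too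
        have hA : pvStepA (done, []) x = (done, []) := by
          simp only [pvStepA]; rw [if_neg hc]
        have hfb : pvFallbackD done (x :: t) = pvFallbackD done t := by
          simp only [pvFallbackD]
          rw [if_neg (by tauto)]
        simp only [List.foldl_cons, hA, hB, hfb]
        exact ih ht done

-- ===== VERDICT (by name: the statement is the Claim_ definition above) =====
theorem process_synonyms_spec : Claim_equal_process_synonyms := by
  intro all_names _
  unfold Spec_process_synonyms process_synonyms process_synonyms_alt
  rw [pvMain _ (PySem.List.sorted_pairwise all_names (fun x => x.1)) PySem.Set.empty,
    pvFallbackD_empty]
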